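-- pv_equiv track=rewrite | github.com/rossuzoltan/Trading | paper_live_metrics.py | has_two_consecutive_critical_reviews
-- ===== SOURCE A (Python) =====
-- from typing import Any
--
-- def has_two_consecutive_critical_reviews(reviews: list[dict[str, Any]]) -> bool:
--     critical_streak = 0
--     for review in reviews:
--         if bool(review.get("critical_review", False)):
--             critical_streak += 1
--             if critical_streak >= 2:
--                 return True
--         else:
--             critical_streak = 0
--     return False
-- ===== SOURCE B (Python) =====
-- def has_two_consecutive_critical_reviews(reviews: list) -> bool:
--     flags = [bool(r.get("critical_review", False)) for r in reviews]
--     return any(a and b for a, b in zip(flags, flags[1:]))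
-- ===== Notes on version B (the rewrite author's own statement) =====
-- stated objective: alternative
-- what changed: Replaces the running streak counter with early return by a per-review flag list plus an adjacent-pair check over zip(flags, flags[1:]).
import Mathlib
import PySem

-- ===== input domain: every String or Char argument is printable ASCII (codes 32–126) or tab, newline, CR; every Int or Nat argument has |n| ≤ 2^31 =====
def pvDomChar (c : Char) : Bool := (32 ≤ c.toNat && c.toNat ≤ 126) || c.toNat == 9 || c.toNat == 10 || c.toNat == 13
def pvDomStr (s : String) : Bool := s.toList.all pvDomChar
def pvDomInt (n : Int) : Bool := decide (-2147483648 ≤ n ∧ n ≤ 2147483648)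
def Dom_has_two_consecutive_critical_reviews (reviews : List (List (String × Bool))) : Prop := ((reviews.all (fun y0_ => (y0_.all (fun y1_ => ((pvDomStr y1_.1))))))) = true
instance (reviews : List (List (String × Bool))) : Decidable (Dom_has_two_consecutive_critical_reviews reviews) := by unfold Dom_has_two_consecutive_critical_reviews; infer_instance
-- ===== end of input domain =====

-- B replaces A's running streak counter (with early return) by a flag list and an adjacent-pair check; alternative decomposition, same O(n) cost.
-- ===== PORT A =====
-- the for-loop of A, carrying the streak counter; returning true models A's early 'return True'
def pvLoopA : List (List (String × Bool)) → Int → Bool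
  | [], _ => false
  | review :: rest, critical_streak =>
    if (PySem.Dict.mk review).getD "critical_review" false then
      if critical_streak + 1 ≥ 2 then true else pvLoopA rest (critical_streak + 1)
    else pvLoopA rest 0

def has_two_consecutive_critical_reviews (reviews : List (List (String × Bool))) : Bool :=
  pvLoopA reviews 0

-- ===== PORT B =====
def has_two_consecutive_critical_reviews_alt (reviews : List (List (String × Bool))) : Bool :=
  let flags := reviews.map (fun r => (PySem.Dict.mk r).getD "critical_review" false)
  (flags.zip (PySem.List.slice flags (some 1) none)).any (fun p => p.1 && p.2)

-- ===== PRECONDITION & SPEC =====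
def Spec_has_two_consecutive_critical_reviews (reviews : List (List (String × Bool))) (out : Bool) : Prop := out = has_two_consecutive_critical_reviews_alt reviews
instance (reviews : List (List (String × Bool))) (out : Bool) : Decidable (Spec_has_two_consecutive_critical_reviews reviews out) := by unfold Spec_has_two_consecutive_critical_reviews; infer_instance

-- ===== CLAIM (what is proved, stated in full; the proofs are below) =====
def Claim_equal_has_two_consecutive_critical_reviews : Prop := ∀ (reviews : List (List (String × Bool))), Dom_has_two_consecutive_critical_reviews reviews → Spec_has_two_consecutive_critical_reviews reviews (has_two_consecutive_critical_reviews reviews)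

-- ===== LEMMAS AND PROOFS =====

-- the flag list of a review list
def pvFlags (reviews : List (List (String × Bool))) : List Bool :=
  reviews.map (fun r => (PySem.Dict.mk r).getD "critical_review" false)

-- invariant: the loop with streak s equals (s ≥ 1 and head flag true) or an adjacent true pair in the flags
theorem pvLoopA_char (l : List (List (String × Bool))) (s : Int) (hs0 : 0 ≤ s) :
    pvLoopA l s =
      ((decide (s ≥ 1) && (pvFlags l).headD false) ||
        ((pvFlags l).zip (pvFlags l).tail).any (fun p => p.1 && p.2)) := by
  induction l generalizing s with
  | nil => simp [pvLoopA, pvFlags]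
  | cons r rest ih =>
    rw [pvLoopA]
    by_cases h : (PySem.Dict.mk r).getD "critical_review" false = true
    · rw [if_pos h]
      by_cases hs : s + 1 ≥ 2
      · rw [if_pos hs]
        have : decide (s ≥ 1) = true := by simp; omega
        simp [pvFlags, h, this]
      · rw [if_neg hs, ih (s + 1) (by omega)]
        have h1 : decide (s ≥ 1) = false := by simp; omega
        cases rest with
        | nil => simp [pvFlags, h1]
        | cons r2 rest2 => simp [pvFlags, h, h1, hs0]
    · rw [if_neg h, ih 0 (by omega)]
      simp only [Bool.not_eq_true] at h
      cases rest with
      | nil => simp [pvFlags, h]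
      | cons r2 rest2 =>
        simp [pvFlags, h]

theorem pvSliceTail (fs : List Bool) :
    PySem.List.slice fs (some 1) none = fs.tail := PySem.List.slice_from_one fs

-- ===== VERDICT (by name: the statement is the Claim_ definition above) =====
theorem has_two_consecutive_critical_reviews_spec : Claim_equal_has_two_consecutive_critical_reviews := by
  intro reviews _
  unfold Spec_has_two_consecutive_critical_reviews has_two_consecutive_critical_reviews
    has_two_consecutive_critical_reviews_alt
  rw [pvLoopA_char _ _ (by omega)]
  simp [pvFlags, pvSliceTail]
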